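-- pv_equiv track=rewrite | github.com/sueszli/vector-database-benchmark | dataset/python-mutated/urllib2.py | parse_http_list
-- ===== SOURCE A (Python) =====
-- def parse_http_list(s):
--     if False:
--         return 10
--     'Parse lists as described by RFC 2068 Section 2.\n\n    In particular, parse comma-separated lists where the elements of\n    the list may include quoted-strings.  A quoted-string could\n    contain a comma.  A non-quoted string could have quotes in the\n    middle.  Neither commas nor quotes count if they are escaped.\n    Only double-quotes count, not single-quotes.\n    '
--     res = []
--     part = ''
--     escape = quote = False
--     for cur in s:
--         if escape:
--             part += cur
--             escape = False
--             continue
--         if quote: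
--             if cur == '\\':
--                 escape = True
--                 continue
--             elif cur == '"':
--                 quote = False
--             part += cur
--             continue
--         if cur == ',':
--             res.append(part)
--             part = ''
--             continue
--         if cur == '"':
--             quote = True
--         part += cur
--     if part:
--         res.append(part)
--     return [part.strip() for part in res]
-- ===== SOURCE B (Python) =====
-- def parse_http_list(s):
--     # Index scanner: outer loop over top-level chars, inner consumer for a quoted section.
--     res = []
--     part = ''
--     i = 0
--     n = len(s)
--     while i < n:
--         c = s[i]
--         if c == ',':
--             res.append(part)
--             part = ''
--             i += 1
--             continue
--         if c == '"':
--             part += c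
--             i += 1
--             while i < n:
--                 c = s[i]
--                 if c == '\\':
--                     if i + 1 < n:
--                         part += s[i + 1]
--                     i += 2
--                     continue
--                 part += c
--                 i += 1
--                 if c == '"':
--                     break
--         else:
--             part += c
--             i += 1
--     if part:
--         res.append(part)
--     return [p.strip() for p in res]
-- ===== Notes on version B (the rewrite author's own statement) =====
-- stated objective: alternative
-- what changed: Replaces the flat per-character state machine with boolean escape/quote flags by an index scanner: an outer loop over top-level characters with a dedicated inner consumer loop for quoted sections.
import Mathlib
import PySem

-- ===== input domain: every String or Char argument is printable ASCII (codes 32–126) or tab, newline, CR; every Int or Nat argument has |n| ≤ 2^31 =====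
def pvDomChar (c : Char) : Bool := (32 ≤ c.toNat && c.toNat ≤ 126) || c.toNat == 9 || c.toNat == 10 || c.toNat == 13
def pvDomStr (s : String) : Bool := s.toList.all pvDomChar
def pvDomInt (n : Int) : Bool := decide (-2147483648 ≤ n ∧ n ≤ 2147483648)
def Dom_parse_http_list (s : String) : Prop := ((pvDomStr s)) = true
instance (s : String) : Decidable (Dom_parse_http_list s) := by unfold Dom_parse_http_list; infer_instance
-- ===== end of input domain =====

-- B replaces A's per-character escape/quote flag machine by an outer scanner with an
-- inner consumer loop for quoted sections (alternative decomposition, same cost).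

-- ===== PORT A =====
-- A's for-loop over the characters with state (res, part, escape, quote); parts kept as List Char.
def pvA_loop : List Char → List (List Char) → List Char → Bool → Bool → List (List Char)
  | [], res, part, _, _ => if part ≠ [] then res ++ [part] else res
  | cur :: rest, res, part, escape, quote =>
    if escape then
      pvA_loop rest res (part ++ [cur]) false quote
    else if quote then
      if cur = '\\' then pvA_loop rest res part true quote
      else if cur = '"' then pvA_loop rest res (part ++ [cur]) escape false
      else pvA_loop rest res (part ++ [cur]) escape quote
    else if cur = ',' then pvA_loop rest (res ++ [part]) [] escape quote
    else if cur = '"' then pvA_loop rest res (part ++ [cur]) escape true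
    else pvA_loop rest res (part ++ [cur]) escape quote

def parse_http_list (s : String) : List String :=
  (pvA_loop s.toList [] [] false false).map (fun p => String.ofList (PySem.Chars.strip p))

-- ===== PORT B =====
-- B's inner while-loop: consume a quoted section (after the opening quote was appended),
-- returning the extended part and the remaining characters.
def pvB_quoted : List Char → List Char → List Char × List Char
  | [], part => (part, [])
  | c :: rest, part =>
    if c = '\\' then
      match rest with
      | [] => (part, [])
      | d :: rest' => pvB_quoted rest' (part ++ [d])
    else if c = '"' then (part ++ [c], rest)
    else pvB_quoted rest (part ++ [c])

theorem pvB_quoted_cons (c : Char) (rest part : List Char) :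
    pvB_quoted (c :: rest) part =
      if c = '\\' then
        match rest with
        | [] => (part, [])
        | d :: rest' => pvB_quoted rest' (part ++ [d])
      else if c = '"' then (part ++ [c], rest)
      else pvB_quoted rest (part ++ [c]) := by
  rw [pvB_quoted.eq_def]

theorem pvB_quoted_len : ∀ (l part : List Char), (pvB_quoted l part).2.length ≤ l.length := by
  intro l part
  induction l, part using pvB_quoted.induct <;>
    simp_all [pvB_quoted, pvB_quoted_cons] <;> omega

-- B's outer while-loop over top-level characters.
def pvB_loop : List Char → List (List Char) → List Char → List (List Char)
  | [], res, part => if part ≠ [] then res ++ [part] else res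
  | c :: rest, res, part =>
    if c = ',' then pvB_loop rest (res ++ [part]) []
    else if c = '"' then
      pvB_loop (pvB_quoted rest (part ++ [c])).2 res (pvB_quoted rest (part ++ [c])).1
    else pvB_loop rest res (part ++ [c])
termination_by l _ _ => l.length
decreasing_by
  · simp
  · exact Nat.lt_succ_of_le (pvB_quoted_len rest _)
  · simp

def parse_http_list_alt (s : String) : List String :=
  (pvB_loop s.toList [] []).map (fun p => String.ofList (PySem.Chars.strip p))

-- ===== PRECONDITION & SPEC =====
def Spec_parse_http_list (s : String) (out : List String) : Prop := out = parse_http_list_alt s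
instance (s : String) (out : List String) : Decidable (Spec_parse_http_list s out) := by unfold Spec_parse_http_list; infer_instance

-- ===== CLAIM (what is proved, stated in full; the proofs are below) =====
def Claim_equal_parse_http_list : Prop := ∀ (s : String), Dom_parse_http_list s → Spec_parse_http_list s (parse_http_list s)

-- ===== LEMMAS AND PROOFS =====

-- Joint invariant, by strong induction on the length of the remaining input:
-- (M) in top-level mode the two loops agree, and
-- (Q) A's quote mode equals B's inner consumer followed by B's outer loop.
theorem pv_loops_eq : ∀ (n : Nat) (l : List Char), l.length ≤ n →
    (∀ res part, pvA_loop l res part false false = pvB_loop l res part) ∧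
    (∀ res part, pvA_loop l res part false true =
      pvB_loop (pvB_quoted l part).2 res (pvB_quoted l part).1) := by
  intro n
  induction n with
  | zero =>
    intro l hl
    have : l = [] := List.eq_nil_of_length_eq_zero (Nat.le_zero.mp hl)
    subst this
    constructor <;> intro res part <;> simp [pvA_loop, pvB_loop, pvB_quoted]
  | succ n ih =>
    intro l hl
    cases l with
    | nil =>
      constructor <;> intro res part <;> simp [pvA_loop, pvB_loop, pvB_quoted]
    | cons c rest =>
      have hrest : rest.length ≤ n := by simpa using hl
      constructor
      · intro res part
        by_cases hc : c = ','
        · simp [pvA_loop, pvB_loop, hc, (ih rest hrest).1]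
        · by_cases hq : c = '"'
          · simpa [pvA_loop, pvB_loop, hc, hq] using (ih rest hrest).2 res (part ++ ['"'])
          · simpa [pvA_loop, pvB_loop, hc, hq] using (ih rest hrest).1 res (part ++ [c])
      · intro res part
        by_cases hb : c = '\\'
        · cases rest with
          | nil => simp [pvA_loop, pvB_loop, pvB_quoted, hb]
          | cons d rest' =>
            have h' : rest'.length ≤ n := by simp at hrest; omega
            simpa [pvA_loop, pvB_quoted_cons, hb] using (ih rest' h').2 res (part ++ [d])
        · by_cases hq : c = '"'
          · simpa [pvA_loop, pvB_quoted_cons, hb, hq] using (ih rest hrest).1 res (part ++ ['"'])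
          · simpa [pvA_loop, pvB_quoted_cons, hb, hq] using (ih rest hrest).2 res (part ++ [c])

-- ===== VERDICT (by name: the statement is the Claim_ definition above) =====
theorem parse_http_list_spec : Claim_equal_parse_http_list := by
  intro s _
  unfold Spec_parse_http_list parse_http_list parse_http_list_alt
  rw [(pv_loops_eq s.toList.length s.toList le_rfl).1 [] []]
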